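-- pv_equiv track=rewrite | github.com/mvajhi/data-structure-and-algorithms | icpc2023/a.py | foo
-- ===== SOURCE A (Python) =====
-- def foo (res, n, i):
--     if i > n:
--         return res
--     tmp = 0
--     for j in str(i):
--         tmp += int(j)
--     out = res * 2 + tmp
--     return foo(out, n, i + 1)
-- ===== SOURCE B (Python) =====
-- def foo(res, n, i):
--     if i > n:
--         return res
--     def digit_sum(j):
--         s = 0
--         while j:
--             s += j % 10
--             j //= 10
--         return s
--     def seg(lo, hi):
--         # sum of digit_sum(j) << (hi - j) for j in lo..hi, built by divide and conquer
--         if hi <= lo: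
--             return digit_sum(lo)
--         mid = (lo + hi) // 2
--         return (seg(lo, mid) << (hi - mid)) + seg(mid + 1, hi)
--     return (res << (n - i + 1)) + seg(i, n)
-- ===== Notes on version B (the rewrite author's own statement) =====
-- stated objective: faster
-- what changed: B replaces A's per-step recursion (res*2 + string digit-sum, shifting the ever-growing accumulator once per step) by a closed-form shift of res plus a divide-and-conquer combination of arithmetic digit sums, so the big integer is assembled with O(log k) full-length shifts instead of k of them.
import Mathlib
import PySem

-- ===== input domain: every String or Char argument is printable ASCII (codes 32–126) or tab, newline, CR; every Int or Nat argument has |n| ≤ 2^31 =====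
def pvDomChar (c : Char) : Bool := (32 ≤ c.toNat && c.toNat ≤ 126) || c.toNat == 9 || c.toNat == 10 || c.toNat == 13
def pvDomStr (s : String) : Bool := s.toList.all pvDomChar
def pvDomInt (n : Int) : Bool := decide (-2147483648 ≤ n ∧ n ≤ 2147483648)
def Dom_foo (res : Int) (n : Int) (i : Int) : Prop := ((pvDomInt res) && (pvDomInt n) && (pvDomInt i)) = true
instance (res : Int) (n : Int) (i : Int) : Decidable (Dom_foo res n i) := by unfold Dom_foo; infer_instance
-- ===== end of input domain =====

-- B replaces A's per-step 'res*2 + string digit-sum' recursion by a closed-form shift of res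
-- plus a divide-and-conquer combination of arithmetic digit sums (objective: faster).

-- ===== PORT A =====
-- tmp = sum of int(j) over the characters of str(i); int('-') raises for negative i,
-- which Pre_foo excludes, so the total form .getD 0 is never taken on an admitted input.
def fooTmp (i : Int) : Int :=
  (PySem.Int.toChars i).foldl (fun t c => t + (PySem.Int.ofChars? [c]).getD 0) 0

def foo (res : Int) (n : Int) (i : Int) : Int :=
  if i > n then res
  else foo (res * 2 + fooTmp i) n (i + 1)
termination_by (n + 1 - i).toNat
decreasing_by omega

-- ===== PORT B =====
-- Source B's 'while j:' loop; exact for the j ≥ 0 reached under Pre_foo (Python diverges for j < 0).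
def digitSumB (j : Int) : Int :=
  if _h : 0 < j then PySem.Int.mod j 10 + digitSumB (PySem.Int.floordiv j 10) else 0
termination_by j.toNat
decreasing_by
  have h1 : PySem.Int.floordiv j 10 = j / 10 := PySem.Int.floordiv_eq_ediv_of_pos (by norm_num)
  rw [h1]; omega

-- Source B's seg: only called with lo ≤ hi; the 'hi <= lo' guard is Source B's own base case.
def segB (lo : Int) (hi : Int) : Int :=
  if _hhl : hi ≤ lo then digitSumB lo
  else
    (segB lo (PySem.Int.floordiv (lo + hi) 2)) <<< (hi - PySem.Int.floordiv (lo + hi) 2).toNat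
      + segB (PySem.Int.floordiv (lo + hi) 2 + 1) hi
termination_by (hi - lo).toNat
decreasing_by
  · have hb := PySem.Int.floordiv_two_mid_bounds (lo := lo) (hi := hi) (by omega)
    have hlt : PySem.Int.floordiv (lo + hi) 2 < hi :=
      (PySem.Int.floordiv_lt_iff_lt_mul (by norm_num)).mpr (by omega)
    omega
  · have hb := PySem.Int.floordiv_two_mid_bounds (lo := lo) (hi := hi) (by omega)
    have hlt : PySem.Int.floordiv (lo + hi) 2 < hi :=
      (PySem.Int.floordiv_lt_iff_lt_mul (by norm_num)).mpr (by omega)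
    omega

def foo_alt (res : Int) (n : Int) (i : Int) : Int :=
  if i > n then res
  else (res <<< (n - i + 1).toNat) + segB i n

-- ===== PRECONDITION & SPEC =====
-- Pre_foo excludes exactly the inputs where A raises: for i < 0 with i ≤ n, int('-') on the
-- sign character of str(i) raises ValueError.
def Pre_foo (res : Int) (n : Int) (i : Int) : Prop := n < i ∨ 0 ≤ i
instance (res : Int) (n : Int) (i : Int) : Decidable (Pre_foo res n i) := by unfold Pre_foo; infer_instance
def pvWitness_foo : Int × Int × Int := (3, 12, 2)

def Spec_foo (res : Int) (n : Int) (i : Int) (out : Int) : Prop := out = foo_alt res n i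
instance (res : Int) (n : Int) (i : Int) (out : Int) : Decidable (Spec_foo res n i out) := by unfold Spec_foo; infer_instance

-- ===== CLAIM (what is proved, stated in full; the proofs are below) =====
def Claim_equal_foo : Prop := ∀ (res : Int) (n : Int) (i : Int), Dom_foo res n i → Pre_foo res n i → Spec_foo res n i (foo res n i)

-- ===== LEMMAS AND PROOFS =====

-- arithmetic digit sum on Nat, the common reference point of the two ports
def dsN (m : Nat) : Int :=
  if m = 0 then 0 else (m % 10 : Nat) + dsN (m / 10)
termination_by m
decreasing_by omega

lemma dval_digitChar (d : Nat) (hd : d < 10) :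
    (PySem.Int.ofChars? [Nat.digitChar d]).getD 0 = (d : Int) := by
  interval_cases d <;> decide

def csum (l : List Char) : Int := (l.map fun c => (PySem.Int.ofChars? [c]).getD 0).sum

lemma toDigitsCore_csum (f : Nat) : ∀ (m : Nat) (l : List Char), m < 10 ^ f →
    csum (Nat.toDigitsCore 10 f m l) = dsN m + csum l := by
  induction f with
  | zero =>
    intro m l hm
    have hz : m = 0 := by omega
    subst hz
    have hdz : dsN 0 = 0 := by rw [dsN]; simp
    simp [Nat.toDigitsCore, hdz]
  | succ f ih =>
    intro m l hm
    rw [Nat.toDigitsCore]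
    have hdz : dsN 0 = 0 := by rw [dsN]; simp
    by_cases h0 : m / 10 = 0
    · simp only [h0, if_true]
      by_cases hz : m = 0
      · subst hz
        rw [csum, List.map_cons, List.sum_cons, dval_digitChar 0 (by omega)]
        simp [hdz, csum]
      · rw [csum, List.map_cons, List.sum_cons, dval_digitChar (m % 10) (by omega),
            show dsN m = ((m % 10 : Nat) : Int) + dsN (m / 10) from by rw [dsN, if_neg hz],
            h0, hdz, csum]
        ring
    · simp only [h0, if_false]
      have hlt : m / 10 < 10 ^ f := by
        have := Nat.pow_succ 10 f
        omega
      have hz : m ≠ 0 := by omega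
      rw [ih (m / 10) _ hlt]
      rw [csum, List.map_cons, List.sum_cons, dval_digitChar (m % 10) (by omega),
          show dsN m = ((m % 10 : Nat) : Int) + dsN (m / 10) from by rw [dsN, if_neg hz],
          csum]
      ring

lemma fooTmp_eq_dsN (i : Int) (h : 0 ≤ i) : fooTmp i = dsN i.toNat := by
  have hfold : ∀ (l : List Char),
      l.foldl (fun t c => t + (PySem.Int.ofChars? [c]).getD 0) 0 = csum l := by
    intro l
    rw [csum]
    induction l using List.reverseRecOn with
    | nil => simp
    | append_singleton xs x ih => simp [List.foldl_append, ih]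
  have htc : PySem.Int.toChars i = Nat.toDigits 10 i.toNat := by
    simp [PySem.Int.toChars, not_lt.mpr h]
  have hpow : i.toNat < 10 ^ (i.toNat + 1) := by
    calc i.toNat < 10 ^ i.toNat := Nat.lt_pow_self (by norm_num)
    _ ≤ 10 ^ (i.toNat + 1) := Nat.pow_le_pow_right (by norm_num) (by omega)
  rw [fooTmp, hfold, htc, Nat.toDigits]
  rw [toDigitsCore_csum (i.toNat + 1) i.toNat [] hpow]
  simp [csum]

lemma digitSumB_eq_dsN : ∀ (k : Nat) (j : Int), 0 ≤ j → j.toNat = k → digitSumB j = dsN k := by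
  intro k
  induction k using Nat.strong_induction_on with
  | _ k ih =>
    intro j hj hk
    rw [digitSumB]
    by_cases h : 0 < j
    · have h1 : PySem.Int.floordiv j 10 = j / 10 := PySem.Int.floordiv_eq_ediv_of_pos (by norm_num)
      have h2 : PySem.Int.mod j 10 = j % 10 := PySem.Int.mod_eq_emod_of_pos (by norm_num)
      simp only [h, dif_pos, h1, h2]
      have hlt : (j / 10).toNat < k := by omega
      rw [ih (j / 10).toNat hlt (j / 10) (by omega) rfl]
      have hk0 : k ≠ 0 := by omega
      rw [show dsN k = ((k % 10 : Nat) : Int) + dsN (k / 10) from by rw [dsN, if_neg hk0]]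
      have e1 : j % 10 = ((k % 10 : Nat) : Int) := by omega
      have e2 : (j / 10).toNat = k / 10 := by omega
      rw [e1, e2]
    · have : k = 0 := by omega
      have hdz : dsN 0 = 0 := by rw [dsN]; simp
      simp [h, this, hdz]

-- head-recursive characterisation of segB
def shead (lo : Int) (hi : Int) : Int :=
  if hi ≤ lo then digitSumB lo
  else digitSumB lo * 2 ^ (hi - lo).toNat + shead (lo + 1) hi
termination_by (hi - lo).toNat
decreasing_by omega

lemma shead_split : ∀ (k : Nat) (lo mid hi : Int), (mid - lo).toNat = k →
    lo ≤ mid → mid < hi →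
    shead lo hi = shead lo mid * 2 ^ (hi - mid).toNat + shead (mid + 1) hi := by
  intro k
  induction k using Nat.strong_induction_on with
  | _ k ih =>
    intro lo mid hi hk hlm hmh
    by_cases heq : lo = mid
    · subst heq
      have h1 : shead lo lo = digitSumB lo := by rw [shead]; simp
      rw [h1, shead, if_neg (by omega)]
    · have hlt : lo < mid := by omega
      have hsplit := ih (mid - (lo + 1)).toNat (by omega) (lo + 1) mid hi rfl (by omega) hmh
      have h1 : shead lo hi = digitSumB lo * 2 ^ (hi - lo).toNat + shead (lo + 1) hi := by
        rw [shead, if_neg (by omega)]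
      have h2 : shead lo mid = digitSumB lo * 2 ^ (mid - lo).toNat + shead (lo + 1) mid := by
        rw [shead, if_neg (by omega)]
      have hpow : (2:Int) ^ (hi - lo).toNat = 2 ^ (mid - lo).toNat * 2 ^ (hi - mid).toNat := by
        rw [← pow_add]
        congr 1
        omega
      rw [h1, hsplit, h2, hpow]
      ring

lemma segB_eq_shead : ∀ (k : Nat) (lo hi : Int), (hi - lo).toNat = k → lo ≤ hi →
    segB lo hi = shead lo hi := by
  intro k
  induction k using Nat.strong_induction_on with
  | _ k ih =>
    intro lo hi hk hle
    by_cases h : hi ≤ lo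
    · rw [segB, dif_pos h, shead, if_pos h]
    · have hlh : lo < hi := by omega
      have hb := PySem.Int.floordiv_two_mid_bounds (lo := lo) (hi := hi) (by omega)
      have hlt : PySem.Int.floordiv (lo + hi) 2 < hi :=
        (PySem.Int.floordiv_lt_iff_lt_mul (by norm_num)).mpr (by omega)
      rw [segB, dif_neg h]
      rw [ih (PySem.Int.floordiv (lo + hi) 2 - lo).toNat (by omega) lo _ rfl (by omega)]
      rw [ih (hi - (PySem.Int.floordiv (lo + hi) 2 + 1)).toNat (by omega) _ hi rfl (by omega)]
      rw [Int.shiftLeft_eq]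
      exact (shead_split (PySem.Int.floordiv (lo + hi) 2 - lo).toNat lo _ hi rfl (by omega) hlt).symm

lemma foo_alt_step (res n i : Int) (_h0 : 0 ≤ i) (hin : i ≤ n) :
    foo_alt res n i = foo_alt (res * 2 + digitSumB i) n (i + 1) := by
  by_cases heq : i = n
  · subst heq
    rw [foo_alt, if_neg (by omega), foo_alt, if_pos (by omega)]
    rw [segB, dif_pos (le_refl i)]
    have : (i - i + 1).toNat = 1 := by omega
    rw [this, Int.shiftLeft_eq]
    ring
  · have hlt : i < n := by omega
    rw [foo_alt, if_neg (by omega), foo_alt, if_neg (by omega)]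
    rw [segB_eq_shead (n - i).toNat i n rfl (by omega)]
    rw [segB_eq_shead (n - (i + 1)).toNat (i + 1) n rfl (by omega)]
    rw [shead, if_neg (by omega)]
    rw [Int.shiftLeft_eq, Int.shiftLeft_eq]
    have hpow : (2:Int) ^ (n - i + 1).toNat = 2 ^ (n - (i + 1) + 1).toNat * 2 := by
      have : (n - i + 1).toNat = (n - (i + 1) + 1).toNat + 1 := by omega
      rw [this, pow_succ]
    have hpow2 : (2:Int) ^ (n - i).toNat = 2 ^ (n - (i + 1) + 1).toNat := by
      congr 1; omega
    rw [hpow, hpow2]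
    ring

lemma foo_eq_alt : ∀ (k : Nat) (res n i : Int), (n + 1 - i).toNat = k → (n < i ∨ 0 ≤ i) →
    foo res n i = foo_alt res n i := by
  intro k
  induction k using Nat.strong_induction_on with
  | _ k ih =>
    intro res n i hk hpre
    by_cases h : i > n
    · rw [foo, if_pos h, foo_alt, if_pos h]
    · have h0 : 0 ≤ i := by omega
      rw [foo, if_neg h]
      rw [ih (n + 1 - (i + 1)).toNat (by omega) _ n (i + 1) rfl (by omega)]
      rw [fooTmp_eq_dsN i h0, ← digitSumB_eq_dsN i.toNat i h0 rfl]
      exact (foo_alt_step res n i h0 (by omega)).symm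

-- ===== VERDICT (by name: the statement is the Claim_ definition above) =====
theorem foo_spec : Claim_equal_foo := by
  intro res n i _ hpre
  unfold Spec_foo Pre_foo at *
  exact foo_eq_alt (n + 1 - i).toNat res n i rfl hpre
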